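-- pv_equiv track=rewrite | github.com/jordansquire/adventofcode | 2023/day6/day6_part2.py | num_winners
-- ===== SOURCE A (Python) =====
-- def num_winners(time, distance_record, speed) -> int:
--     winners = 0
--     distance = speed * (time - speed)
--     while distance > distance_record and speed > 0:
--         winners += 1
--         speed -= 1
--         distance = speed * (time - speed)
--
--     return winners
-- ===== SOURCE B (Python) =====
-- def num_winners(time, distance_record, speed) -> int:
--     # Empty run: start speed is non-positive or already not beating the record.
--     if speed <= 0 or speed * (time - speed) <= distance_record:
--         return 0
--     # Binary search the least s in [1, speed] that beats the record; the
--     # winning speeds form a contiguous run [s, speed] (distance is concave in s).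
--     lo, hi = 1, speed
--     while lo < hi:
--         mid = (lo + hi) // 2
--         if mid * (time - mid) > distance_record:
--             hi = mid
--         else:
--             lo = mid + 1
--     return speed - lo + 1
-- ===== Notes on version B (the rewrite author's own statement) =====
-- stated objective: faster
-- what changed: Replaces the linear countdown loop with a binary search for the lowest winning speed, using that distance is concave in speed so the winning speeds reachable from the start form a contiguous run.
import Mathlib
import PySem

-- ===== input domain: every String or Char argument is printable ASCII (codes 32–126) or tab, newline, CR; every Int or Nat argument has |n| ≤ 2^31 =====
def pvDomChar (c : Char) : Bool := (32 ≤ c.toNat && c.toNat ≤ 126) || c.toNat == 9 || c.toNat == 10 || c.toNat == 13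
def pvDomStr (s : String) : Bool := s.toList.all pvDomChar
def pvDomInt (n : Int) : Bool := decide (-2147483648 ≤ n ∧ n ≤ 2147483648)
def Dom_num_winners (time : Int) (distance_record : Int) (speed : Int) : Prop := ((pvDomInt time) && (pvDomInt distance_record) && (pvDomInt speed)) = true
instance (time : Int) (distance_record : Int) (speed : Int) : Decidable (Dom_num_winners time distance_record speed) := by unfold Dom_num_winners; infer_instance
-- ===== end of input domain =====

-- B replaces A's linear countdown loop by a binary search for the lowest winning
-- speed, using that distance is concave in speed (so winning speeds are contiguous).

-- ===== PORT A =====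
-- A's while loop: counts down from `speed` while distance beats the record.
def numWinnersLoop (time : Int) (distance_record : Int) (speed : Int) (winners : Int) : Int :=
  if h : speed * (time - speed) > distance_record ∧ speed > 0 then
    numWinnersLoop time distance_record (speed - 1) (winners + 1)
  else winners
termination_by speed.toNat
decreasing_by omega

def num_winners (time : Int) (distance_record : Int) (speed : Int) : Int :=
  numWinnersLoop time distance_record speed 0

-- ===== PORT B =====
-- B's binary search loop over [lo, hi]: least s with s*(time-s) > distance_record.
def nwSearch (time : Int) (distance_record : Int) (lo : Int) (hi : Int) : Int :=
  if h : lo < hi then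
    let mid := PySem.Int.floordiv (lo + hi) 2
    if mid * (time - mid) > distance_record then nwSearch time distance_record lo mid
    else nwSearch time distance_record (mid + 1) hi
  else lo
termination_by (hi - lo).toNat
decreasing_by
  all_goals
    have hf : (lo+hi).fdiv 2 = (lo+hi)/2 := by rw [Int.fdiv_eq_ediv]; norm_num
    simp only [PySem.Int.floordiv] at *
    omega

def num_winners_alt (time : Int) (distance_record : Int) (speed : Int) : Int :=
  if speed ≤ 0 ∨ speed * (time - speed) ≤ distance_record then 0
  else speed - nwSearch time distance_record 1 speed + 1

-- ===== PRECONDITION & SPEC =====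
def Spec_num_winners (time : Int) (distance_record : Int) (speed : Int) (out : Int) : Prop := out = num_winners_alt time distance_record speed
instance (time : Int) (distance_record : Int) (speed : Int) (out : Int) : Decidable (Spec_num_winners time distance_record speed out) := by unfold Spec_num_winners; infer_instance

-- ===== CLAIM (what is proved, stated in full; the proofs are below) =====
def Claim_equal_num_winners : Prop := ∀ (time : Int) (distance_record : Int) (speed : Int), Dom_num_winners time distance_record speed → Spec_num_winners time distance_record speed (num_winners time distance_record speed)

-- ===== LEMMAS AND PROOFS =====

-- Concavity of s ↦ s*(t-s): a speed between two winning speeds also wins.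
theorem nw_concave (t d a b c : Int) (hab : a ≤ b) (hbc : b ≤ c)
    (ha : a * (t - a) > d) (hc : c * (t - c) > d) : b * (t - b) > d := by
  rcases eq_or_lt_of_le hab with rfl | hab'
  · exact ha
  rcases eq_or_lt_of_le hbc with rfl | hbc'
  · exact hc
  have key : b * (t - b) * (c - a) =
      a * (t - a) * (c - b) + c * (t - c) * (b - a) + (b - a) * (c - b) * (c - a) := by ring
  have h1 : d * (c - b) < a * (t - a) * (c - b) :=
    mul_lt_mul_of_pos_right ha (by omega)
  have h2 : d * (b - a) < c * (t - c) * (b - a) :=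
    mul_lt_mul_of_pos_right hc (by omega)
  have h3 : 0 < (b - a) * (c - b) * (c - a) :=
    mul_pos (mul_pos (by omega) (by omega)) (by omega)
  nlinarith [key, h1, h2, h3]

-- The Python floor division by 2 keeps the midpoint inside (lo, hi).
theorem nw_mid_bounds (lo hi : Int) (h : lo < hi) :
    lo ≤ PySem.Int.floordiv (lo + hi) 2 ∧ PySem.Int.floordiv (lo + hi) 2 < hi := by
  have hf : (lo + hi).fdiv 2 = (lo + hi) / 2 := by rw [Int.fdiv_eq_ediv]; norm_num
  simp only [PySem.Int.floordiv]
  omega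

-- Specification of B's binary search: it returns the least winning speed,
-- given the invariant that hi wins and everything below lo does not.
theorem nwSearch_spec (t d : Int) : ∀ lo hi : Int, 1 ≤ lo → lo ≤ hi →
    hi * (t - hi) > d → (lo = 1 ∨ ¬ (lo - 1) * (t - (lo - 1)) > d) →
    lo ≤ nwSearch t d lo hi ∧ nwSearch t d lo hi ≤ hi ∧
    nwSearch t d lo hi * (t - nwSearch t d lo hi) > d ∧
    (nwSearch t d lo hi = 1 ∨
      ¬ (nwSearch t d lo hi - 1) * (t - (nwSearch t d lo hi - 1)) > d) := by
  intro lo hi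
  induction lo, hi using nwSearch.induct t d with
  | case1 lo hi h mid hP ih =>
    intro h1 hlh hhi hlo
    rw [nwSearch, dif_pos h]
    have hmide : PySem.Int.floordiv (lo + hi) 2 = mid := rfl
    rw [hmide, if_pos hP]
    have hmid := nw_mid_bounds lo hi h
    rw [hmide] at hmid
    have := ih h1 hmid.1 hP hlo
    exact ⟨this.1, by omega, this.2.2⟩
  | case2 lo hi h mid hP ih =>
    intro h1 hlh hhi hlo
    rw [nwSearch, dif_pos h]
    have hmide : PySem.Int.floordiv (lo + hi) 2 = mid := rfl
    rw [hmide, if_neg hP]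
    have hmid := nw_mid_bounds lo hi h
    rw [hmide] at hmid
    have := ih (by omega) (by omega) hhi (Or.inr (by simpa using hP))
    exact ⟨by omega, this.2⟩
  | case3 lo hi h =>
    intro h1 hlh hhi hlo
    rw [nwSearch, dif_neg h]
    have heq : lo = hi := by omega
    subst heq
    exact ⟨le_refl _, le_refl _, hhi, hlo⟩

-- A's loop returns its accumulator when the guard fails.
theorem numWinnersLoop_stop (t d speed w : Int)
    (h : ¬ (speed * (t - speed) > d ∧ speed > 0)) :
    numWinnersLoop t d speed w = w := by
  rw [numWinnersLoop, dif_neg h]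

-- A's loop counts exactly the run [r, speed] of winning speeds.
theorem numWinnersLoop_run (t d r : Int) (h1 : 1 ≤ r)
    (hstop : r = 1 ∨ ¬ (r - 1) * (t - (r - 1)) > d) :
    ∀ n : Nat, ∀ speed w : Int, speed = r + n →
    (∀ s, r ≤ s → s ≤ speed → s * (t - s) > d) →
    numWinnersLoop t d speed w = w + (speed - r + 1) := by
  intro n
  induction n with
  | zero =>
    intro speed w hs hP
    have hsr : speed = r := by omega
    subst hsr
    rw [numWinnersLoop, dif_pos ⟨hP speed (le_refl _) (le_refl _), by omega⟩]
    rw [numWinnersLoop_stop]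
    · omega
    · rintro ⟨hc1, hc2⟩
      rcases hstop with h | h
      · omega
      · exact h hc1
  | succ k ih =>
    intro speed w hs hP
    rw [numWinnersLoop, dif_pos ⟨hP speed (by omega) (le_refl _), by omega⟩]
    rw [ih (speed - 1) (w + 1) (by omega) (fun s hrs hss => hP s hrs (by omega))]
    omega

-- ===== VERDICT (by name: the statement is the Claim_ definition above) =====
theorem num_winners_spec : Claim_equal_num_winners := by
  intro t d speed _
  unfold Spec_num_winners num_winners num_winners_alt
  by_cases hb : speed ≤ 0 ∨ speed * (t - speed) ≤ d
  · rw [if_pos hb, numWinnersLoop_stop]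
    rintro ⟨hc1, hc2⟩
    rcases hb with h | h <;> omega
  · rw [if_neg hb]
    have hsp : 0 < speed := by omega
    have hPs : speed * (t - speed) > d := by omega
    obtain ⟨h1r, hrs, hPr, hstop⟩ :=
      nwSearch_spec t d 1 speed (le_refl _) (by omega) hPs (Or.inl rfl)
    rw [numWinnersLoop_run t d (nwSearch t d 1 speed) h1r hstop
        (speed - nwSearch t d 1 speed).toNat speed 0 (by omega)
        (fun s h1 h2 => nw_concave t d (nwSearch t d 1 speed) s speed h1 h2 hPr hPs)]
    omega
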